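-- pv_equiv track=rewrite | github.com/prophile/srcomp-unified | ranker/sr/comp/ranker/__init__.py | calc_positions
-- ===== SOURCE A (Python) =====
-- from collections import defaultdict
--
-- def calc_positions(zpoints, dsq_list=()):
--     """
--     Calculate positions from a map of zones to in-game points.
--
--     Parameters
--     ----------
--     zpoints : dict
--         A mapping from some key (typically a zone or corner name) to game
--         points (usually a numeric type, but can be any type that is comparable
--         and usable as a key for dictionaries).
--     dsq_list : list
--         If provided, is a :py:class:`list` of keys of teams or zones that have
--         been disqualified and are therefore considered below last place.
--
--     Returns
--     -------
--     dict
--         A mapping from positions to an iterable of teams in that position.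
--
--     Note
--     ----
--        In case of a tie, both teams are awarded the same position, as is usual
--        in sport. That is, if team A has 3 points, team B has 3 points and team
--        C has 1 point, then teams A and B are both awarded 1\ :sup:`st`, and C
--        is awarded 3\ :sup:`rd`.
--
--     Examples
--     --------
--     Some examples of usage are shown below:
--
--     >>> calc_positions({'A': 3, 'B': 3, 'C': 1})
--     {1: {'A', 'B'}, 3: {'C'}}
--
--     >>> calc_positions({'A': 3, 'B': 3, 'C': 0, 'D': 0}, ['A', 'C'])
--     {1: {'B'}, 2: {'D'}, 3: {'A', 'C'}}
--     """
--
--     pos_map = {}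
--     points_map = defaultdict(set)
--
--     for zone, points in zpoints.items():
--         if zone in dsq_list:
--             points = -1
--         points_map[points].add(zone)
--
--     position = 1
--     for points in sorted(list(points_map.keys()), reverse=True):
--         pos_map[position] = points_map[points]
--         position += len(points_map[points])
--
--     return pos_map
-- ===== SOURCE B (Python) =====
-- def calc_positions(zpoints, dsq_list=()):
--     eff = {zone: (-1 if zone in dsq_list else points)
--            for zone, points in zpoints.items()}
--     vals = eff.values()
--     rank = {zone: 1 + sum(1 for q in vals if q > p) for zone, p in eff.items()}
--     pos_map = {}
--     for pos in range(1, len(eff) + 1):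
--         group = {zone for zone in eff if rank[zone] == pos}
--         if group:
--             pos_map[pos] = group
--     return pos_map
-- ===== Notes on version B (the rewrite author's own statement) =====
-- stated objective: simpler
-- what changed: B drops the sort-descending-then-accumulate pass: it computes each zone's position directly as 1 + the number of zones with strictly greater effective points, then emits position groups by scanning candidate positions 1..n.
import Mathlib
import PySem

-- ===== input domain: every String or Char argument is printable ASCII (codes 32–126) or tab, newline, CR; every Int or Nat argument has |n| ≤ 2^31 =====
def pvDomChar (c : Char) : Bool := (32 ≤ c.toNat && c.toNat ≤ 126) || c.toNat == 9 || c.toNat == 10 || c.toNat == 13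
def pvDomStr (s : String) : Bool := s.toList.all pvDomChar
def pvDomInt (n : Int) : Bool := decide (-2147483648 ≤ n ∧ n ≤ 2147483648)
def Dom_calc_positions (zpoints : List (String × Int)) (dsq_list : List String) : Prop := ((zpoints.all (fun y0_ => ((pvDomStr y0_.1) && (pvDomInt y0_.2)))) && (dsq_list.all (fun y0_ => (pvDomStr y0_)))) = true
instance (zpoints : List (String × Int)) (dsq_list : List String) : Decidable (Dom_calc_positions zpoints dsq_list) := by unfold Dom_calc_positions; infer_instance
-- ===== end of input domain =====

-- B replaces A's sort-descending-plus-running-position-counter by a direct rank computation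
-- (position = 1 + number of zones with strictly greater effective points); objective: simpler.

-- ===== PORT A =====
def calc_positions (zpoints : List (String × Int)) (dsq_list : List String) : List (Int × List String) :=
  let points_map : PySem.Dict Int (PySem.Set String) :=
    (PySem.Dict.ofList zpoints).items.foldl
      (fun d zp =>
        let points : Int := if dsq_list.contains zp.1 then -1 else zp.2
        d.modify points [] (fun s => PySem.Set.add s zp.1))
      PySem.Dict.empty
  let loop :=
    (PySem.List.sorted points_map.keys (fun x => x) true).foldl
      (fun st points =>
        let g := points_map.getD points []
        (st.1.insert st.2 g, st.2 + (g.length : Int)))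
      ((PySem.Dict.empty : PySem.Dict Int (List String)), (1 : Int))
  loop.1.items

-- ===== PORT B =====
def calc_positions_alt (zpoints : List (String × Int)) (dsq_list : List String) : List (Int × List String) :=
  let eff : PySem.Dict String Int :=
    (PySem.Dict.ofList zpoints).items.foldl
      (fun d zp => d.insert zp.1 (if dsq_list.contains zp.1 then -1 else zp.2))
      PySem.Dict.empty
  let vals := eff.values
  let rank : PySem.Dict String Int :=
    eff.items.foldl
      (fun d zp => d.insert zp.1 (1 + (vals.countP (fun q => decide (zp.2 < q)) : Int)))
      PySem.Dict.empty
  let pos_map :=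
    (PySem.List.pyRange 1 ((eff.size : Int) + 1) 1).foldl
      (fun pm pos =>
        let group : PySem.Set String :=
          eff.keys.foldl
            (fun s zone => if rank.getD zone 0 == pos then PySem.Set.add s zone else s)
            PySem.Set.empty
        if group.isEmpty then pm else pm.insert pos group)
      (PySem.Dict.empty : PySem.Dict Int (List String))
  pos_map.items

-- ===== PRECONDITION & SPEC =====
def Spec_calc_positions (zpoints : List (String × Int)) (dsq_list : List String) (out : List (Int × List String)) : Prop := out = calc_positions_alt zpoints dsq_list
instance (zpoints : List (String × Int)) (dsq_list : List String) (out : List (Int × List String)) : Decidable (Spec_calc_positions zpoints dsq_list out) := by unfold Spec_calc_positions; infer_instance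

-- ===== CLAIM (what is proved, stated in full; the proofs are below) =====
def Claim_equal_calc_positions : Prop := ∀ (zpoints : List (String × Int)) (dsq_list : List String), Dom_calc_positions zpoints dsq_list → Spec_calc_positions zpoints dsq_list (calc_positions zpoints dsq_list)

-- ===== LEMMAS AND PROOFS =====

-- the effective items list: zones in dict order paired with their effective points (-1 if disqualified)
def pvEff (zpoints : List (String × Int)) (dsq_list : List String) : List (String × Int) :=
  (PySem.Dict.ofList zpoints).items.map (fun zp => (zp.1, if dsq_list.contains zp.1 then -1 else zp.2))

def pvVals (zpoints : List (String × Int)) (dsq_list : List String) : List Int :=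
  (pvEff zpoints dsq_list).map (fun zp => zp.2)

-- the position awarded to effective point value c: 1 + number of zones strictly above
def pvPos (V : List Int) (c : Int) : Int := 1 + (V.countP (fun q => decide (c < q)) : Nat)

-- the group of zones with effective points c, in dict order
def pvGrp (l : List (String × Int)) (c : Int) : List String :=
  (l.filter (fun zp => zp.2 == c)).map (fun zp => zp.1)

-- the distinct effective point values, descending
def pvK (zpoints : List (String × Int)) (dsq_list : List String) : List Int :=
  PySem.List.sorted (PySem.Set.ofList (pvVals zpoints dsq_list)) (fun x => x) true

-- A's second loop as a function of the sorted key list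
def pvRankL (g : Int → List String) : List Int → Int → List (Int × List String)
  | [], _ => []
  | c :: cs, pos => (pos, g c) :: pvRankL g cs (pos + ((g c).length : Int))

-- B's group at a given position
def pvGroupAt (zpoints : List (String × Int)) (dsq_list : List String) (pos : Int) : List String :=
  ((pvEff zpoints dsq_list).filter (fun zp => pvPos (pvVals zpoints dsq_list) zp.2 == pos)).map
    (fun zp => zp.1)

lemma pv_nodup_fst (zpoints : List (String × Int)) (dsq_list : List String) :
    ((pvEff zpoints dsq_list).map (fun zp => zp.1)).Nodup := by
  have h : (pvEff zpoints dsq_list).map (fun zp => zp.1)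
      = (PySem.Dict.ofList zpoints).keys := by
    simp [pvEff, PySem.Dict.keys, List.map_map, Function.comp]
  rw [h]; exact PySem.Dict.nodup_keys_ofList zpoints

lemma pv_countP_or_split (l : List Int) (p q : Int → Bool) (h : ∀ a ∈ l, ¬(p a = true ∧ q a = true)) :
    l.countP (fun a => p a || q a) = l.countP p + l.countP q := by
  induction l with
  | nil => simp
  | cons a t ih =>
    have ht : ∀ b ∈ t, ¬(p b = true ∧ q b = true) := fun b hb => h b (List.mem_cons_of_mem _ hb)
    have ha := h a (List.mem_cons_self ..)
    by_cases hp : p a = true <;> by_cases hq : q a = true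
    · exact absurd ⟨hp, hq⟩ ha
    all_goals simp [hp, hq, ih ht]; try omega

lemma pv_grp_length (l : List (String × Int)) (c : Int) :
    (pvGrp l c).length = (l.map (fun zp => zp.2)).count c := by
  simp only [pvGrp, List.length_map, List.count_eq_countP, List.countP_map]
  rw [← List.countP_eq_length_filter]
  rfl

lemma pv_pos_lt (V : List Int) (c c' : Int) (hc : c ∈ V) (h : c' < c) :
    pvPos V c < pvPos V c' := by
  have hsplit : V.countP (fun a => (decide (c < a)) || (a == c))
      = V.countP (fun q => decide (c < q)) + V.countP (fun a => a == c) :=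
    pv_countP_or_split V _ _ (by intro a _ ⟨h1, h2⟩; simp at h1 h2; omega)
  have hmono : V.countP (fun a => (decide (c < a)) || (a == c)) ≤ V.countP (fun q => decide (c' < q)) := by
    apply List.countP_mono_left
    intro a _ ha
    simp at ha ⊢
    rcases ha with h1 | h2 <;> omega
  have hcount : 0 < V.countP (fun a => a == c) := by
    rw [← List.count_eq_countP]; exact List.count_pos_iff.mpr hc
  simp only [pvPos]
  omega

lemma pv_pos_le_length (V : List Int) (c : Int) (hc : c ∈ V) :
    pvPos V c ≤ (V.length : Int) := by
  have hne : V.countP (fun q => decide (c < q)) ≠ V.length := by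
    intro he
    have := List.countP_eq_length.mp he c hc
    simp at this
  have hle : V.countP (fun q => decide (c < q)) ≤ V.length := List.countP_le_length
  simp only [pvPos]; omega

lemma pv_eq_of_pairwise_lt_of_mem_iff (l₁ l₂ : List Int)
    (h₁ : l₁.Pairwise (· < ·)) (h₂ : l₂.Pairwise (· < ·))
    (hm : ∀ x, x ∈ l₁ ↔ x ∈ l₂) : l₁ = l₂ := by
  have hperm : l₁.Perm l₂ := by
    apply List.perm_of_nodup_nodup_toFinset_eq
    · exact h₁.imp ne_of_lt
    · exact h₂.imp ne_of_lt
    · ext x; simp [List.mem_toFinset, hm x]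
  exact hperm.eq_of_pairwise (fun a b _ _ hab hba => le_antisymm hab hba)
    (h₁.imp le_of_lt) (h₂.imp le_of_lt)

lemma pv_K_pairwise (zpoints : List (String × Int)) (dsq_list : List String) :
    (pvK zpoints dsq_list).Pairwise (fun a b => b < a) := by
  have hle := PySem.List.sorted_pairwise_rev (PySem.Set.ofList (pvVals zpoints dsq_list)) (fun x => x)
  have hnd : (pvK zpoints dsq_list).Nodup := by
    have hperm := PySem.List.sorted_perm (PySem.Set.ofList (pvVals zpoints dsq_list)) (fun x => x) true
    exact hperm.nodup_iff.mpr (PySem.Set.nodup_ofList _)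
  exact (hle.and hnd).imp (fun h => lt_of_le_of_ne h.1 (Ne.symm h.2))

lemma pv_K_mem (zpoints : List (String × Int)) (dsq_list : List String) (c : Int) :
    c ∈ pvK zpoints dsq_list ↔ c ∈ pvVals zpoints dsq_list := by
  have hperm := PySem.List.sorted_perm (PySem.Set.ofList (pvVals zpoints dsq_list)) (fun x => x) true
  rw [pvK, hperm.mem_iff, PySem.Set.mem_ofList]

lemma pv_groupFold (l : List (String × Int)) :
    ∀ (d : PySem.Dict Int (PySem.Set String)),
      (l.map (fun zp => zp.1)).Nodup →
      (∀ c z, z ∈ d.getD c [] → z ∉ l.map (fun zp => zp.1)) →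
      ∀ c, (l.foldl (fun d zp => d.modify zp.2 [] (fun s => PySem.Set.add s zp.1)) d).getD c []
        = d.getD c [] ++ pvGrp l c := by
  induction l with
  | nil => intro d _ _ c; simp [pvGrp]
  | cons zp t ih =>
    intro d hnd hdisj c
    rw [List.map_cons] at hnd
    obtain ⟨hz, hndt⟩ := List.nodup_cons.mp hnd
    have hzmem : zp.1 ∉ d.getD zp.2 [] := fun hmem => hdisj zp.2 zp.1 hmem (by simp)
    have hadd : PySem.Set.add (d.getD zp.2 []) zp.1 = d.getD zp.2 [] ++ [zp.1] := by
      simp only [PySem.Set.add, PySem.Set.contains]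
      rw [if_neg]
      simpa using hzmem
    have hstep : ∀ c', (d.modify zp.2 [] (fun s => PySem.Set.add s zp.1)).getD c' []
        = if c' = zp.2 then d.getD zp.2 [] ++ [zp.1] else d.getD c' [] := by
      intro c'
      rw [PySem.Dict.getD_modify]
      split_ifs with h
      · exact hadd
      · rfl
    have hdisj' : ∀ c' z, z ∈ (d.modify zp.2 [] (fun s => PySem.Set.add s zp.1)).getD c' [] →
        z ∉ t.map (fun zp => zp.1) := by
      intro c' z hmem
      rw [hstep c'] at hmem
      split_ifs at hmem with h
      · rcases List.mem_append.mp hmem with h1 | h1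
        · exact fun ht => hdisj zp.2 z h1 (by simp; right; simpa using ht)
        · simp at h1; subst h1; simpa using hz
      · exact fun ht => hdisj c' z hmem (by simp; right; simpa using ht)
    rw [List.foldl_cons, ih _ hndt hdisj' c, hstep c]
    by_cases h : c = zp.2
    · subst h
      simp [pvGrp, List.append_assoc]
    · have : (zp.2 == c) = false := by simp; omega
      simp [pvGrp, this, h]

lemma pv_rankFold (g : Int → List String) :
    ∀ (ks : List Int) (pm : PySem.Dict Int (List String)) (pos : Int),
      (∀ k ∈ pm.keys, k < pos) →
      (∀ c ∈ ks, g c ≠ []) →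
      (ks.foldl (fun st c => (st.1.insert st.2 (g c), st.2 + ((g c).length : Int))) (pm, pos)).1.items
        = pm.items ++ pvRankL g ks pos := by
  intro ks
  induction ks with
  | nil => intro pm pos _ _; simp [pvRankL]
  | cons c cs ih =>
    intro pm pos hlt hne
    have hfresh : pm.contains pos = false := by
      rw [PySem.Dict.contains_eq_decide_mem_keys]
      simp only [decide_eq_false_iff_not]
      intro hmem
      exact absurd (hlt pos hmem) (lt_irrefl pos)
    have hglen : 0 < (g c).length := List.length_pos_iff.mpr (hne c (by simp))
    have hlt' : ∀ k ∈ (pm.insert pos (g c)).keys, k < pos + ((g c).length : Int) := by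
      rw [PySem.Dict.keys_insert_of_not_contains _ _ hfresh]
      intro k hk
      rcases List.mem_append.mp hk with h1 | h1
      · have := hlt k h1; omega
      · simp at h1; omega
    rw [List.foldl_cons, ih _ _ hlt' (fun e he => hne e (by simp [he]))]
    rw [PySem.Dict.items_insert_of_not_contains _ _ hfresh]
    simp [pvRankL]

lemma pv_rankL_eq_map (V : List Int) (g : Int → List String)
    (hg : ∀ c, (g c).length = V.count c) :
    ∀ (ks : List Int) (pos : Int),
      ks.Pairwise (fun a b => b < a) →
      (∀ q ∈ V, q ∈ ks ∨ (∀ c ∈ ks, c < q)) →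
      (∀ c cs, ks = c :: cs → pos = pvPos V c) →
      pvRankL g ks pos = ks.map (fun c => (pvPos V c, g c)) := by
  intro ks
  induction ks with
  | nil => intro pos _ _ _; simp [pvRankL]
  | cons c cs ih =>
    intro pos hpw hcomp hhead
    have hpos : pos = pvPos V c := hhead c cs rfl
    have hpwcs : cs.Pairwise (fun a b => b < a) := hpw.of_cons
    have hcl : ∀ e ∈ cs, e < c := fun e he => (List.pairwise_cons.mp hpw).1 e he
    have hcomp' : ∀ q ∈ V, q ∈ cs ∨ (∀ e ∈ cs, e < q) := by
      intro q hq
      rcases hcomp q hq with h1 | h1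
      · rcases List.mem_cons.mp h1 with h2 | h2
        · right; subst h2; exact hcl
        · left; exact h2
      · right; exact fun e he => h1 e (by simp [he])
    have hhead' : ∀ c' cs', cs = c' :: cs' → pos + ((g c).length : Int) = pvPos V c' := by
      intro c' cs' hcs
      subst hcs
      have hc'c : c' < c := hcl c' (by simp)
      have hcongr : V.countP (fun q => decide (c' < q))
          = V.countP (fun a => (decide (c < a)) || (a == c)) := by
        apply List.countP_congr
        intro q hq
        simp only [Bool.or_eq_true, decide_eq_true_eq, beq_iff_eq]
        constructor
        · intro h1
          rcases hcomp q hq with h2 | h2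
          · rcases List.mem_cons.mp h2 with h3 | h3
            · right; exact h3
            · rcases List.mem_cons.mp h3 with h4 | h4
              · omega
              · have := hpwcs; have h5 := (List.pairwise_cons.mp hpwcs).1 q h4; omega
          · have := h2 c (by simp); left; exact this
        · intro h1; rcases h1 with h2 | h2 <;> omega
      have hsplit : V.countP (fun a => (decide (c < a)) || (a == c))
          = V.countP (fun q => decide (c < q)) + V.countP (fun a => a == c) :=
        pv_countP_or_split V _ _ (by intro a _ ⟨h1, h2⟩; simp at h1 h2; omega)
      have hcnt : (g c).length = V.countP (fun a => a == c) := by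
        rw [hg c, List.count_eq_countP]
      simp only [pvPos] at hpos ⊢
      omega
    rw [List.map_cons, ← hpos, pvRankL]
    rw [ih _ hpwcs hcomp' hhead']

lemma pv_grp_ne_nil (zpoints : List (String × Int)) (dsq_list : List String) (c : Int)
    (hc : c ∈ pvVals zpoints dsq_list) : pvGrp (pvEff zpoints dsq_list) c ≠ [] := by
  obtain ⟨zp, hzp, heq⟩ := List.mem_map.mp hc
  simp only [pvGrp, ne_eq, List.map_eq_nil_iff, List.filter_eq_nil_iff]
  intro h
  exact h zp hzp (by simp [heq])

lemma pv_A_char (zpoints : List (String × Int)) (dsq_list : List String) :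
    calc_positions zpoints dsq_list
      = pvRankL (pvGrp (pvEff zpoints dsq_list)) (pvK zpoints dsq_list) 1 := by
  have hfold : (PySem.Dict.ofList zpoints).items.foldl
      (fun d zp =>
        let points : Int := if dsq_list.contains zp.1 then -1 else zp.2
        d.modify points [] (fun s => PySem.Set.add s zp.1))
      PySem.Dict.empty
    = (pvEff zpoints dsq_list).foldl
        (fun d zp => d.modify zp.2 [] (fun s => PySem.Set.add s zp.1)) PySem.Dict.empty := by
    rw [pvEff, List.foldl_map]
  set P := (pvEff zpoints dsq_list).foldl
      (fun d zp => d.modify zp.2 [] (fun s => PySem.Set.add s zp.1)) PySem.Dict.empty with hP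
  have hgetD : ∀ c, P.getD c [] = pvGrp (pvEff zpoints dsq_list) c := by
    intro c
    rw [hP, pv_groupFold _ _ (pv_nodup_fst zpoints dsq_list) (by simp [PySem.Dict.getD_empty]) c]
    simp [PySem.Dict.getD_empty]
  have hkeys : P.keys = PySem.Set.ofList (pvVals zpoints dsq_list) := by
    rw [hP, PySem.Dict.keys_foldl_modify_key (pvEff zpoints dsq_list) (fun zp => zp.2) []
          (fun d zp => (fun s => PySem.Set.add s zp.1)) PySem.Dict.empty]
    simp [PySem.Dict.keys_empty, PySem.Set.update, PySem.Set.ofList_eq_foldl, pvVals]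
  have hgfun : (fun c => P.getD c []) = pvGrp (pvEff zpoints dsq_list) := funext hgetD
  have hr := pv_rankFold (fun c => P.getD c []) (pvK zpoints dsq_list) PySem.Dict.empty 1
      (by simp [PySem.Dict.keys_empty]) (by
        intro c hc
        show P.getD c [] ≠ []
        rw [hgetD c]
        exact pv_grp_ne_nil zpoints dsq_list c ((pv_K_mem zpoints dsq_list c).mp hc))
  simp only [] at hr
  simp only [pvK] at hr
  simp only [calc_positions]
  rw [hfold, hkeys]
  rw [hr]
  simp [hgfun, pvK, PySem.Dict.empty]

lemma pv_B_char (zpoints : List (String × Int)) (dsq_list : List String) :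
    calc_positions_alt zpoints dsq_list
      = ((PySem.List.pyRange 1 (((pvEff zpoints dsq_list).length : Int) + 1) 1).filter
            (fun pos => !(pvGroupAt zpoints dsq_list pos).isEmpty)).map
          (fun pos => (pos, pvGroupAt zpoints dsq_list pos)) := by
  have hndk : ((PySem.Dict.ofList zpoints).items.map (fun zp => zp.1)).Nodup :=
    PySem.Dict.nodup_keys_ofList zpoints
  set E := (PySem.Dict.ofList zpoints).items.foldl
      (fun d zp => d.insert zp.1 (if dsq_list.contains zp.1 = true then -1 else zp.2))
      PySem.Dict.empty with hE
  have hEitems : E.items = pvEff zpoints dsq_list := by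
    rw [hE, PySem.Dict.items_foldl_insert_fresh (PySem.Dict.ofList zpoints).items
          (fun zp : String × Int => zp.1)
          (fun zp : String × Int => if dsq_list.contains zp.1 = true then -1 else zp.2) _
          (fun a _ => PySem.Dict.contains_empty _) hndk]
    simp [pvEff, PySem.Dict.empty]
  have hEvals : E.values = pvVals zpoints dsq_list := by
    simp only [PySem.Dict.values, hEitems, pvVals]
  have hEkeys : E.keys = (pvEff zpoints dsq_list).map (fun zp => zp.1) := by
    simp only [PySem.Dict.keys, hEitems]
  have hEsize : (E.size : Int) = ((pvEff zpoints dsq_list).length : Int) := by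
    simp only [PySem.Dict.size, hEitems]
  set R := E.items.foldl
      (fun d zp => d.insert zp.1 (1 + (E.values.countP (fun q => decide (zp.2 < q)) : Int)))
      PySem.Dict.empty with hR
  have hRitems : R.items = (pvEff zpoints dsq_list).map
      (fun zp => (zp.1, pvPos (pvVals zpoints dsq_list) zp.2)) := by
    rw [hR, hEitems, PySem.Dict.items_foldl_insert_fresh (pvEff zpoints dsq_list)
          (fun zp : String × Int => zp.1)
          (fun zp : String × Int => 1 + (E.values.countP (fun q => decide (zp.2 < q)) : Int)) _
          (fun a _ => PySem.Dict.contains_empty _) (pv_nodup_fst zpoints dsq_list)]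
    simp only [hEvals, pvPos, PySem.Dict.empty]
    simp
  have hRkeys : R.keys.Nodup := by
    simp only [PySem.Dict.keys, hRitems, List.map_map]
    exact pv_nodup_fst zpoints dsq_list
  have hRgetD : ∀ zp ∈ pvEff zpoints dsq_list,
      R.getD zp.1 0 = pvPos (pvVals zpoints dsq_list) zp.2 := by
    intro zp hzp
    apply PySem.Dict.getD_of_mem_items R _ hRkeys
    rw [hRitems]
    exact List.mem_map_of_mem hzp
  have hgroup : ∀ pos, E.keys.foldl
      (fun s zone => if R.getD zone 0 == pos then PySem.Set.add s zone else s) []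
      = pvGroupAt zpoints dsq_list pos := by
    intro pos
    rw [hEkeys, List.foldl_map]
    rw [PySem.List.foldl_congr_mem _ _
        (fun s zp => if pvPos (pvVals zpoints dsq_list) zp.2 == pos then PySem.Set.add s zp.1 else s) _
        (by intro acc zp hzp; rw [hRgetD zp hzp])]
    rw [PySem.List.foldl_if_eq_foldl_filter
        (fun zp : String × Int => pvPos (pvVals zpoints dsq_list) zp.2 == pos)
        (fun s zp => PySem.Set.add s zp.1)]
    rw [← List.foldl_map (f := fun zp : String × Int => zp.1) (g := PySem.Set.add),
        ← PySem.Set.ofList_eq_foldl]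
    rw [PySem.Set.ofList_eq_self_of_nodup _
        ((List.filter_sublist.map _).nodup (pv_nodup_fst zpoints dsq_list))]
    rfl
  simp only [calc_positions_alt]
  rw [← hE, ← hR, hEsize]
  simp only [PySem.Set.empty]
  rw [PySem.List.foldl_congr_mem _ _
      (fun pm pos => if (pvGroupAt zpoints dsq_list pos).isEmpty then pm
        else pm.insert pos (pvGroupAt zpoints dsq_list pos)) _
      (by intro acc pos _; beta_reduce; rw [hgroup pos])]
  rw [PySem.List.foldl_congr_mem _ _
      (fun pm pos => if !(pvGroupAt zpoints dsq_list pos).isEmpty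
        then pm.insert pos (pvGroupAt zpoints dsq_list pos) else pm) _
      (by
        intro acc pos _
        beta_reduce
        cases h : (pvGroupAt zpoints dsq_list pos).isEmpty <;> simp)]
  have hif := PySem.List.foldl_if_eq_foldl_filter
      (fun pos => !(pvGroupAt zpoints dsq_list pos).isEmpty)
      (fun pm pos => (pm : PySem.Dict Int (List String)).insert pos (pvGroupAt zpoints dsq_list pos))
      (PySem.List.pyRange 1 (((pvEff zpoints dsq_list).length : Int) + 1) 1)
      PySem.Dict.empty
  beta_reduce at hif
  rw [hif]
  have hins := PySem.Dict.items_foldl_insert_fresh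
      ((PySem.List.pyRange 1 (((pvEff zpoints dsq_list).length : Int) + 1) 1).filter
        (fun pos => !(pvGroupAt zpoints dsq_list pos).isEmpty))
      (fun pos : Int => pos)
      (fun pos => pvGroupAt zpoints dsq_list pos)
      (PySem.Dict.empty : PySem.Dict Int (List String))
      (fun a _ => PySem.Dict.contains_empty _)
      (by
        simp only [List.map_id']
        exact (PySem.List.nodup_pyRange_one _ _).filter _)
  beta_reduce at hins
  rw [hins]
  simp [PySem.Dict.empty]


-- ===== VERDICT (by name: the statement is the Claim_ definition above) =====
theorem calc_positions_spec : Claim_equal_calc_positions := by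
  intro zpoints dsq_list _
  unfold Spec_calc_positions
  have hVlen : (pvVals zpoints dsq_list).length = (pvEff zpoints dsq_list).length := by
    simp [pvVals]
  have hmemV : ∀ c, c ∈ pvVals zpoints dsq_list ↔
      ∃ zp ∈ pvEff zpoints dsq_list, zp.2 = c := by
    intro c
    simp [pvVals, List.mem_map]
  -- A's result as a map over the distinct descending values
  have hA : calc_positions zpoints dsq_list
      = (pvK zpoints dsq_list).map
          (fun c => (pvPos (pvVals zpoints dsq_list) c, pvGrp (pvEff zpoints dsq_list) c)) := by
    rw [pv_A_char]
    apply pv_rankL_eq_map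
    · intro c; exact pv_grp_length _ c
    · exact pv_K_pairwise zpoints dsq_list
    · intro q hq; exact Or.inl ((pv_K_mem zpoints dsq_list q).mpr hq)
    · intro c cs hK
      have hle := PySem.List.key_head_sorted_rev_ge (PySem.Set.ofList (pvVals zpoints dsq_list))
          (fun x => x) (show PySem.List.sorted _ (fun x => x) true = c :: cs from hK)
      have hcnt : (pvVals zpoints dsq_list).countP (fun q => decide (c < q)) = 0 := by
        rw [List.countP_eq_zero]
        intro q hq
        have := hle q ((PySem.Set.mem_ofList _ q).mpr hq)
        beta_reduce at this
        simp only [decide_eq_true_eq]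
        omega
      simp [pvPos, hcnt]
  -- the positions B keeps are exactly the positions of the distinct descending values
  have hpositions : ((PySem.List.pyRange 1 (((pvEff zpoints dsq_list).length : Int) + 1) 1).filter
        (fun pos => !(pvGroupAt zpoints dsq_list pos).isEmpty))
      = (pvK zpoints dsq_list).map (pvPos (pvVals zpoints dsq_list)) := by
    apply pv_eq_of_pairwise_lt_of_mem_iff
    · exact (PySem.List.pairwise_lt_pyRange_one _ _).filter _
    · rw [List.pairwise_map]
      apply (pv_K_pairwise zpoints dsq_list).imp_of_mem
      intro a b ha _ hba
      exact pv_pos_lt _ a b ((pv_K_mem zpoints dsq_list a).mp ha) hba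
    · intro x
      constructor
      · intro hx
        obtain ⟨hr, hne⟩ := List.mem_filter.mp hx
        have : pvGroupAt zpoints dsq_list x ≠ [] := by
          simpa using hne
        obtain ⟨zp, hzp, hpos⟩ : ∃ zp ∈ pvEff zpoints dsq_list,
            pvPos (pvVals zpoints dsq_list) zp.2 = x := by
          obtain ⟨y, hy⟩ := List.exists_mem_of_ne_nil _ this
          rw [pvGroupAt] at hy
          obtain ⟨zp, hzpf, rfl⟩ := List.mem_map.mp hy
          obtain ⟨hzp, hbeq⟩ := List.mem_filter.mp hzpf
          exact ⟨zp, hzp, by simpa using hbeq⟩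
        apply List.mem_map.mpr
        refine ⟨zp.2, (pv_K_mem zpoints dsq_list zp.2).mpr ?_, hpos⟩
        exact (hmemV zp.2).mpr ⟨zp, hzp, rfl⟩
      · intro hx
        obtain ⟨c, hcK, rfl⟩ := List.mem_map.mp hx
        have hcV := (pv_K_mem zpoints dsq_list c).mp hcK
        apply List.mem_filter.mpr
        constructor
        · apply PySem.List.mem_pyRange_one.mpr
          have h1 := pv_pos_le_length (pvVals zpoints dsq_list) c hcV
          rw [hVlen] at h1
          simp only [pvPos] at h1 ⊢
          omega
        · obtain ⟨zp, hzp, hc⟩ := (hmemV c).mp hcV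
          have hne : pvGroupAt zpoints dsq_list (pvPos (pvVals zpoints dsq_list) c) ≠ [] :=
            List.ne_nil_of_mem (List.mem_map_of_mem (l := _)
              (List.mem_filter.mpr ⟨hzp, by simp [hc]⟩))
          simpa using hne
  -- B's groups at those positions are A's groups
  have hgrpeq : ∀ c ∈ pvK zpoints dsq_list,
      pvGroupAt zpoints dsq_list (pvPos (pvVals zpoints dsq_list) c)
        = pvGrp (pvEff zpoints dsq_list) c := by
    intro c hcK
    have hcV := (pv_K_mem zpoints dsq_list c).mp hcK
    unfold pvGroupAt pvGrp
    congr 1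
    apply List.filter_congr
    intro zp hzp
    have hzpV : zp.2 ∈ pvVals zpoints dsq_list := (hmemV zp.2).mpr ⟨zp, hzp, rfl⟩
    by_cases h : zp.2 = c
    · simp [h]
    · have hne : pvPos (pvVals zpoints dsq_list) zp.2 ≠ pvPos (pvVals zpoints dsq_list) c := by
        rcases lt_trichotomy zp.2 c with hlt | heq | hgt
        · exact ne_of_gt (pv_pos_lt _ c zp.2 hcV hlt)
        · exact absurd heq h
        · exact ne_of_lt (pv_pos_lt _ zp.2 c hzpV hgt)
      simp [hne, h]
  rw [hA, pv_B_char, hpositions, List.map_map]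
  apply List.map_congr_left
  intro c hcK
  simp only [Function.comp]
  rw [hgrpeq c hcK]
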